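-- pv_equiv track=rewrite | github.com/snyke7/aoc2023 | day14.py | parse_dish
-- ===== SOURCE A (Python) =====
-- def parse_dish(input_lines):
--     cubes = {
--         (i, j)
--         for i, line in enumerate(input_lines)
--         for j, el in enumerate(line.strip())
--         if el == '#'
--     }
--     rollers = {
--         (i, j)
--         for i, line in enumerate(input_lines)
--         for j, el in enumerate(line.strip())
--         if el == 'O'
--     }
--     return cubes, rollers, len(input_lines[0].strip())
-- ===== SOURCE B (Python) =====
-- def _positions(s, ch):
--     # indices of ch in s, found by repeated str.find instead of scanning chars
--     js = []
--     j = s.find(ch)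
--     while j != -1:
--         js.append(j)
--         j = s.find(ch, j + 1)
--     return js
--
--
-- def parse_dish(input_lines):
--     cubes = set()
--     rollers = set()
--     for i, line in enumerate(input_lines):
--         s = line.strip()
--         for j in _positions(s, '#'):
--             cubes.add((i, j))
--         for j in _positions(s, 'O'):
--             rollers.add((i, j))
--     return cubes, rollers, len(input_lines[0].strip())
-- ===== Notes on version B (the rewrite author's own statement) =====
-- stated objective: alternative
-- what changed: B never enumerates characters: per line it locates '#' and 'O' cells by a repeated str.find index-search loop (find from last hit + 1 until -1) and adds those index lists to the sets, instead of A's two whole-grid per-character set comprehensions.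
import Mathlib
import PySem

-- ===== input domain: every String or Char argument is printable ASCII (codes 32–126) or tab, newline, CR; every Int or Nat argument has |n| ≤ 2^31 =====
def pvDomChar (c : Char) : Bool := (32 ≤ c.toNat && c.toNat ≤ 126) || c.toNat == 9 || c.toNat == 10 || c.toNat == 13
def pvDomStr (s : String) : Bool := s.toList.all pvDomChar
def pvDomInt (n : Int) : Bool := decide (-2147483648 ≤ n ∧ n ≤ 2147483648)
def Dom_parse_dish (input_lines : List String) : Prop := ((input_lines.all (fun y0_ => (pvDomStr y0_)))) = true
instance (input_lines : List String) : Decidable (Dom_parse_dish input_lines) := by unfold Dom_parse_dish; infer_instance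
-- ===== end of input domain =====

-- B locates '#'/'O' cells per line by a repeated str.find index-search loop instead of A's
-- per-character set comprehensions; return values proved equal on nonempty input
-- (both Pythons raise IndexError on []).

-- ===== PORT A =====
-- A: two set comprehensions over enumerate(input_lines) × enumerate(line.strip()),
-- one keeping '#' cells, one keeping 'O' cells, then len(input_lines[0].strip()).
def parse_dish (input_lines : List String) : (List (Int × Int)) × (List (Int × Int)) × Int :=
  let cubes : PySem.Set (Int × Int) :=
    (PySem.List.enumerate input_lines 0).foldl
      (fun s p =>
        (PySem.List.enumerate (PySem.Chars.strip p.2.toList) 0).foldl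
          (fun s q => if q.2 = '#' then PySem.Set.add s (p.1, q.1) else s) s)
      PySem.Set.empty
  let rollers : PySem.Set (Int × Int) :=
    (PySem.List.enumerate input_lines 0).foldl
      (fun s p =>
        (PySem.List.enumerate (PySem.Chars.strip p.2.toList) 0).foldl
          (fun s q => if q.2 = 'O' then PySem.Set.add s (p.1, q.1) else s) s)
      PySem.Set.empty
  (cubes, rollers, ((PySem.Chars.strip (PySem.List.pyGetD input_lines 0 "").toList).length : Int))

-- ===== PORT B =====
-- _positions: the repeated-find while loop 'j = s.find(ch); while j != -1: collect; j = s.find(ch, j+1)'.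
-- The 'l.length < start' guard is for termination only: Python's find also returns -1 there.
def pvPositions (l : List Char) (c : Char) (start : Nat) : List Nat :=
  if _hs : l.length < start then []
  else
    let j := PySem.Chars.findFrom l [c] (start : Int) none
    if hj : j = -1 then []
    else j.toNat :: pvPositions l c (j.toNat + 1)
termination_by l.length + 1 - start
decreasing_by
  have hs' : start ≤ l.length := by omega
  obtain ⟨h1, h2, -⟩ := PySem.Chars.findFrom_natCast_spec l [c] start hs' hj
  have hlen : 1 ≤ (l.drop j.toNat).length := h2.length_le
  simp only [List.length_drop] at hlen
  omega

-- B: loop over enumerate(input_lines) carrying (cubes, rollers); per line, add the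
-- (i, j) for j in _positions(stripped, '#') to cubes and likewise 'O' to rollers.
def parse_dish_alt (input_lines : List String) : (List (Int × Int)) × (List (Int × Int)) × Int :=
  let res : PySem.Set (Int × Int) × PySem.Set (Int × Int) :=
    (PySem.List.enumerate input_lines 0).foldl
      (fun acc p =>
        let s := PySem.Chars.strip p.2.toList
        (List.foldl (fun (cs : PySem.Set (Int × Int)) (j : Nat) => PySem.Set.add cs (p.1, (j : Int)))
           acc.1 (pvPositions s '#' 0),
         List.foldl (fun (rs : PySem.Set (Int × Int)) (j : Nat) => PySem.Set.add rs (p.1, (j : Int)))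
           acc.2 (pvPositions s 'O' 0)))
      (PySem.Set.empty, PySem.Set.empty)
  (res.1, res.2, ((PySem.Chars.strip (PySem.List.pyGetD input_lines 0 "").toList).length : Int))

-- ===== PRECONDITION & SPEC =====
-- Pre_ excludes only the empty list, where Python's input_lines[0] raises IndexError (in A and in B).
def Pre_parse_dish (input_lines : List String) : Prop := input_lines ≠ []
instance (input_lines : List String) : Decidable (Pre_parse_dish input_lines) := by unfold Pre_parse_dish; infer_instance
def pvWitness_parse_dish : List String := ["#O."]
def Spec_parse_dish (input_lines : List String) (out : (List (Int × Int)) × (List (Int × Int)) × Int) : Prop := out = parse_dish_alt input_lines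
instance (input_lines : List String) (out : (List (Int × Int)) × (List (Int × Int)) × Int) : Decidable (Spec_parse_dish input_lines out) := by unfold Spec_parse_dish; infer_instance

-- ===== CLAIM =====
def Claim_equal_parse_dish : Prop := ∀ (input_lines : List String), Dom_parse_dish input_lines → Pre_parse_dish input_lines → Spec_parse_dish input_lines (parse_dish input_lines)

-- ===== LEMMAS AND PROOFS =====

-- [c] is a prefix of xs iff xs starts with c.
lemma singleton_prefix_iff {c : Char} {xs : List Char} : [c] <+: xs ↔ xs.head? = some c := by
  cases xs with
  | nil => simp
  | cons a t =>
    constructor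
    · rintro ⟨r, hr⟩; simp at hr; simp [hr.1]
    · intro h; simp at h; exact ⟨t, by simp [h]⟩

-- [c] is an infix of xs iff c is a member.
lemma singleton_infix_iff {c : Char} {xs : List Char} : [c] <:+: xs ↔ c ∈ xs := by
  constructor
  · intro h; exact h.subset (by simp)
  · intro h
    obtain ⟨l1, l2, rfl⟩ := List.append_of_mem h
    exact ⟨l1, l2, by simp⟩

-- folding an if-guarded add over a list with no matching element is the identity
lemma foldl_if_skip {α : Type} (L : List (Int × Char)) (c : Char) (f : α → Int → α) (s0 : α)
    (h : ∀ q ∈ L, q.2 ≠ c) :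
    L.foldl (fun s q => if q.2 = c then f s q.1 else s) s0 = s0 := by
  induction L generalizing s0 with
  | nil => rfl
  | cons q L ih =>
    have hq : q.2 ≠ c := h q (by simp)
    simp only [List.foldl_cons, if_neg hq]
    exact ih s0 (fun r hr => h r (by simp [hr]))

-- core: folding over the repeated-find positions (from 'start') equals folding the
-- if-guarded add over enumerate of the dropped suffix
lemma pos_fold {α : Type} (l : List Char) (c : Char) (f : α → Int → α)
    (start : Nat) (hle : start ≤ l.length) (s0 : α) :
    List.foldl (fun (s : α) (j : Nat) => f s (j : Int)) s0 (pvPositions l c start)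
      = (PySem.List.enumerate (l.drop start) (start : Int)).foldl
          (fun s q => if q.2 = c then f s q.1 else s) s0 := by
  rw [pvPositions]
  simp only [dif_neg (by omega : ¬ l.length < start)]
  by_cases hj : PySem.Chars.findFrom l [c] (start : Int) none = -1
  · simp only [dif_pos hj]
    have hnc : ¬ [c] <:+: l.drop start :=
      (PySem.Chars.findFrom_natCast_eq_neg_one_iff l [c] start hle).mp hj
    rw [singleton_infix_iff] at hnc
    refine (foldl_if_skip _ c f s0 ?_).symm.trans rfl |>.symm.symm
    intro q hq
    obtain ⟨k, hk, rfl⟩ := (PySem.List.mem_enumerate_iff _ _ _).mp hq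
    intro hcontra
    exact hnc (by rw [← hcontra]; exact List.getElem_mem hk)
  · simp only [dif_neg hj]
    obtain ⟨h1, h2, h3⟩ := PySem.Chars.findFrom_natCast_spec l [c] start hle hj
    set j := PySem.Chars.findFrom l [c] (start : Int) none with hjdef
    clear_value j
    have hsj : start ≤ j.toNat := by omega
    have hjlen : 1 ≤ (l.drop j.toNat).length := h2.length_le
    simp only [List.length_drop] at hjlen
    have hjlt : j.toNat < l.length := by omega
    have hhead : (l.drop j.toNat).head? = some c := singleton_prefix_iff.mp h2
    have hdropj : l.drop j.toNat = c :: l.drop (j.toNat + 1) := by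
      have ht : (l.drop j.toNat).tail = l.drop (j.toNat + 1) := by
        rw [← List.drop_drop]; simp
      cases hd : l.drop j.toNat with
      | nil => simp [hd] at hhead
      | cons a t =>
        simp [hd] at hhead ht
        simp [hhead, ← ht]
    have hsplit : l.drop start = (l.drop start).take (j.toNat - start) ++ l.drop j.toNat := by
      have hdd : l.drop j.toNat = (l.drop start).drop (j.toNat - start) := by
        rw [List.drop_drop]; congr 1; omega
      rw [hdd]
      exact (List.take_append_drop _ (l.drop start)).symm
    have hdlen : ((l.drop start).take (j.toNat - start)).length = j.toNat - start := by
      simp [List.length_take, List.length_drop]; omega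
    conv_rhs => rw [hsplit, PySem.List.enumerate_append]
    rw [List.foldl_append]
    have hskip : ∀ q ∈ PySem.List.enumerate ((l.drop start).take (j.toNat - start)) (start : Int), q.2 ≠ c := by
      intro q hq
      obtain ⟨k, hk, rfl⟩ := (PySem.List.mem_enumerate_iff _ _ _).mp hq
      rw [hdlen] at hk
      have hnp := h3 (start + k) (by omega) (by omega)
      rw [singleton_prefix_iff] at hnp
      intro hcontra
      apply hnp
      have hkk : k < ((l.drop start).take (j.toNat - start)).length := by omega
      have hget : ((l.drop start).take (j.toNat - start))[k] = l[start + k]'(by omega) := by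
        simp [List.getElem_take, List.getElem_drop]
      rw [hget] at hcontra
      rw [List.head?_drop]
      simp [List.getElem?_eq_getElem (by omega : start + k < l.length)]
      exact hcontra
    rw [foldl_if_skip _ c f s0 hskip]
    rw [hdropj, PySem.List.enumerate_cons, List.foldl_cons, List.foldl_cons]
    have hcast : (start : Int) + (((l.drop start).take (j.toNat - start)).length : Int) = (j.toNat : Int) := by
      rw [hdlen]; omega
    rw [hcast]
    dsimp only
    rw [if_pos rfl]
    have hrec := pos_fold l c f (j.toNat + 1) (by omega) (f s0 (j.toNat : Int))
    rw [hrec]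
    norm_cast
termination_by l.length + 1 - start
decreasing_by omega

-- the paired per-line fold (in A's enumerate shape, after inner_eq) splits componentwise
lemma outer_pair (L : List (Int × String)) (a b : PySem.Set (Int × Int)) :
    L.foldl
      (fun acc p =>
        ((PySem.List.enumerate (PySem.Chars.strip p.2.toList) 0).foldl
           (fun s q => if q.2 = '#' then PySem.Set.add s (p.1, q.1) else s) acc.1,
         (PySem.List.enumerate (PySem.Chars.strip p.2.toList) 0).foldl
           (fun s q => if q.2 = 'O' then PySem.Set.add s (p.1, q.1) else s) acc.2)) (a, b)
    = (L.foldl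
        (fun s p =>
          (PySem.List.enumerate (PySem.Chars.strip p.2.toList) 0).foldl
            (fun s q => if q.2 = '#' then PySem.Set.add s (p.1, q.1) else s) s) a,
       L.foldl
        (fun s p =>
          (PySem.List.enumerate (PySem.Chars.strip p.2.toList) 0).foldl
            (fun s q => if q.2 = 'O' then PySem.Set.add s (p.1, q.1) else s) s) b) := by
  induction L generalizing a b with
  | nil => rfl
  | cons p L ih => simp only [List.foldl_cons]; exact ih _ _

-- per-line: B's find-based inner fold equals A's enumerate-based inner fold
lemma inner_eq (c : Char) (p : Int × String) (s : PySem.Set (Int × Int)) :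
    List.foldl (fun (cs : PySem.Set (Int × Int)) (j : Nat) => PySem.Set.add cs (p.1, (j : Int)))
      s (pvPositions (PySem.Chars.strip p.2.toList) c 0)
    = (PySem.List.enumerate (PySem.Chars.strip p.2.toList) 0).foldl
        (fun s q => if q.2 = c then PySem.Set.add s (p.1, q.1) else s) s := by
  have := pos_fold (PySem.Chars.strip p.2.toList) c
    (fun cs j => PySem.Set.add cs (p.1, j)) 0 (by omega) s
  simpa using this

-- ===== VERDICT =====
theorem parse_dish_spec : Claim_equal_parse_dish := by
  intro input_lines _ _
  unfold Spec_parse_dish parse_dish parse_dish_alt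
  simp only [inner_eq]
  rw [outer_pair]
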